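-- pv_equiv track=rewrite | github.com/askiggy/iggy-enrich-python | iggyenrich/iggy_data_package.py | infer_bounds
-- ===== SOURCE A (Python) =====
-- from typing import Dict, List, Optional, Union
--
-- KNOWN_BOUNDARIES = [
--     "qk_isochrone_walk_10m",
--     "cbg",
--     "census_tract",
--     "county",
--     "locality",
--     "metro",
--     "zipcode",
-- ]
--
-- def infer_bounds(boundaries: List[str] = [], features: List[str] = []) -> Dict:
--     """Determine which boundaries, and any specific features within the boundary,
--     to load"""
--     bounds_features_to_load = {}
--     if boundaries:
--         bounds_features_to_load = {b: [] for b in boundaries if b in KNOWN_BOUNDARIES}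
--     if features:
--         for kb in KNOWN_BOUNDARIES:
--             kb_features = [f for f in features if f.endswith(kb)]
--             if kb_features:
--                 bounds_features_to_load[kb] = kb_features
--     if not bounds_features_to_load:
--         bounds_features_to_load = {kb: [] for kb in KNOWN_BOUNDARIES}
--     return bounds_features_to_load
-- ===== SOURCE B (Python) =====
-- KNOWN_BOUNDARIES = [
--     "qk_isochrone_walk_10m",
--     "cbg",
--     "census_tract",
--     "county",
--     "locality",
--     "metro",
--     "zipcode",
-- ]
--
-- # No known boundary is a suffix of another, so a feature can end with at most
-- # one of them; dispatching on the feature's last character narrows the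
-- # candidates to at most two before a single suffix check.
-- _BY_LAST_CHAR = {}
-- for _kb in KNOWN_BOUNDARIES:
--     _BY_LAST_CHAR.setdefault(_kb[-1], []).append(_kb)
--
--
-- def _match(f):
--     """The unique known boundary f ends with, or None."""
--     for kb in _BY_LAST_CHAR.get(f[-1:], []):
--         if f.endswith(kb):
--             return kb
--     return None
--
--
-- def infer_bounds(boundaries=[], features=[]):
--     """Determine which boundaries, and any specific features within the boundary,
--     to load"""
--     groups = {}
--     for f in features:
--         kb = _match(f)
--         if kb is not None:
--             groups.setdefault(kb, []).append(f)
--     result = {b: [] for b in boundaries if b in KNOWN_BOUNDARIES} if boundaries else {}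
--     for kb in KNOWN_BOUNDARIES:
--         if kb in groups:
--             result[kb] = groups[kb]
--     return result or {kb: [] for kb in KNOWN_BOUNDARIES}
-- ===== Notes on version B (the rewrite author's own statement) =====
-- stated objective: faster
-- what changed: Instead of filtering the whole feature list once per known boundary, B precomputes a last-character dispatch table (no known boundary is a suffix of another, so each feature matches at most one), finds each feature's unique boundary with at most two suffix checks in a single pass, grouping into a dict, then assembles the result in KNOWN_BOUNDARIES order.
import Mathlib
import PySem

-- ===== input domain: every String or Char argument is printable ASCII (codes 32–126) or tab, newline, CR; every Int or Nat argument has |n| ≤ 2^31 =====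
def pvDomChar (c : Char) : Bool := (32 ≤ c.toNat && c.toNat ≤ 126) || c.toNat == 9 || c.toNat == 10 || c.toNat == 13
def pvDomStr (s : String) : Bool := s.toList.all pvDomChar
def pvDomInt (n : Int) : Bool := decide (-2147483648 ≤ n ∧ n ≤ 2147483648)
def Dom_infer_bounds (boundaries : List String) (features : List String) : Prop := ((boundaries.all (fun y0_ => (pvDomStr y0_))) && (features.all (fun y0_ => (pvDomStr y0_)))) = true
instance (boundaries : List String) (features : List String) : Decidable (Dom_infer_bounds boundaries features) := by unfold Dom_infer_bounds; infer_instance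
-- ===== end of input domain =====

-- B replaces A's per-boundary re-scan of `features` by a last-character dispatch table
-- (no known boundary is a suffix of another, so each feature matches at most one boundary,
-- found with at most two suffix checks) and one grouping pass (objective: faster, constant-factor).

def KNOWN_BOUNDARIES : List String :=
  ["qk_isochrone_walk_10m", "cbg", "census_tract", "county", "locality", "metro", "zipcode"]

-- ===== PORT A =====
def infer_bounds (boundaries : List String) (features : List String) : List (String × List String) :=
  let d0 : PySem.Dict String (List String) := PySem.Dict.empty
  let d1 := if boundaries = [] then d0
            else boundaries.foldl
              (fun d b => if KNOWN_BOUNDARIES.contains b then d.insert b [] else d) PySem.Dict.empty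
  let d2 := if features = [] then d1
            else KNOWN_BOUNDARIES.foldl
              (fun d kb =>
                let kf := features.filter (fun f => PySem.Str.endswith f kb)
                if kf = [] then d else d.insert kb kf) d1
  (if d2.items = [] then PySem.Dict.mk (KNOWN_BOUNDARIES.map (fun kb => (kb, ([] : List String)))) else d2).items

-- ===== PORT B =====
-- module-level precomputation `_BY_LAST_CHAR` (Python keys are the one-character strings
-- _kb[-1]; ported with Char keys, an exact bijection on these keys)
def BY_LAST_CHAR : PySem.Dict Char (List String) :=
  KNOWN_BOUNDARIES.foldl (fun d kb => d.modify (kb.toList.getLastD ' ') [] (· ++ [kb])) PySem.Dict.empty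

-- `_match(f)`: Python indexes the dict with the slice f[-1:] (the empty string, absent from
-- the dict, when f is empty); ported as a match on the last character, `none` for empty f.
def matchBoundary (f : String) : Option String :=
  match f.toList.getLast? with
  | none => none
  | some c => (BY_LAST_CHAR.getD c []).find? (fun kb => PySem.Str.endswith f kb)

def infer_bounds_alt (boundaries : List String) (features : List String) : List (String × List String) :=
  let groups : PySem.Dict String (List String) :=
    features.foldl
      (fun d f =>
        match matchBoundary f with
        | some kb => d.modify kb [] (· ++ [f])
        | none => d) PySem.Dict.empty
  let r0 := if boundaries = [] then (PySem.Dict.empty : PySem.Dict String (List String))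
            else boundaries.foldl
              (fun d b => if KNOWN_BOUNDARIES.contains b then d.insert b [] else d) PySem.Dict.empty
  let r1 := KNOWN_BOUNDARIES.foldl
    (fun d kb => if groups.contains kb then d.insert kb (groups.getD kb []) else d) r0
  (if r1.items = [] then PySem.Dict.mk (KNOWN_BOUNDARIES.map (fun kb => (kb, ([] : List String)))) else r1).items

-- ===== PRECONDITION & SPEC =====
def Spec_infer_bounds (boundaries : List String) (features : List String) (out : List (String × List String)) : Prop := out = infer_bounds_alt boundaries features
instance (boundaries : List String) (features : List String) (out : List (String × List String)) : Decidable (Spec_infer_bounds boundaries features out) := by unfold Spec_infer_bounds; infer_instance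

-- ===== CLAIM (what is proved, stated in full; the proofs are below) =====
def Claim_equal_infer_bounds : Prop := ∀ (boundaries : List String) (features : List String), Dom_infer_bounds boundaries features → Spec_infer_bounds boundaries features (infer_bounds boundaries features)

-- ===== LEMMAS AND PROOFS =====

lemma getLast?_of_suffix {l1 l2 : List Char} (h : l1 <:+ l2) (hne : l1 ≠ []) :
    l2.getLast? = l1.getLast? := by
  obtain ⟨t, rfl⟩ := h
  exact List.getLast?_append_of_ne_nil t hne

-- evaluating the concrete dispatch table
lemma by_m : BY_LAST_CHAR.getD 'm' [] = ["qk_isochrone_walk_10m"] := by decide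
lemma by_g : BY_LAST_CHAR.getD 'g' [] = ["cbg"] := by decide
lemma by_t : BY_LAST_CHAR.getD 't' [] = ["census_tract"] := by decide
lemma by_y : BY_LAST_CHAR.getD 'y' [] = ["county", "locality"] := by decide
lemma by_o : BY_LAST_CHAR.getD 'o' [] = ["metro"] := by decide
lemma by_e : BY_LAST_CHAR.getD 'e' [] = ["zipcode"] := by decide

-- a feature is put in kb's group by B exactly when it ends with kb (for a known kb):
-- the dispatch is exhaustive, and no known boundary is a suffix of another.
lemma matchBoundary_eq_some_iff (f : String) (kb : String) (hkb : kb ∈ KNOWN_BOUNDARIES) :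
    matchBoundary f = some kb ↔ PySem.Str.endswith f kb = true := by
  constructor
  · intro h
    unfold matchBoundary at h
    cases hl : f.toList.getLast? with
    | none => rw [hl] at h; exact absurd h (by simp)
    | some c =>
      rw [hl] at h
      simpa using List.find?_some h
  · intro h
    have hsuf : kb.toList <:+ f.toList := by
      simp only [PySem.Str.endswith, PySem.Chars.endswith_iff] at h
      exact h
    simp only [KNOWN_BOUNDARIES, List.mem_cons, List.not_mem_nil, or_false] at hkb
    rcases hkb with rfl | rfl | rfl | rfl | rfl | rfl | rfl
    · have hlast : f.toList.getLast? = some 'm' := by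
        rw [getLast?_of_suffix hsuf (by decide)]; decide
      unfold matchBoundary; rw [hlast]; simp [by_m]; simpa using h
    · have hlast : f.toList.getLast? = some 'g' := by
        rw [getLast?_of_suffix hsuf (by decide)]; decide
      unfold matchBoundary; rw [hlast]; simp [by_g]; simpa using h
    · have hlast : f.toList.getLast? = some 't' := by
        rw [getLast?_of_suffix hsuf (by decide)]; decide
      unfold matchBoundary; rw [hlast]; simp [by_t]; simpa using h
    · have hlast : f.toList.getLast? = some 'y' := by
        rw [getLast?_of_suffix hsuf (by decide)]; decide
      have hC : PySem.Chars.endswith f.toList ['c','o','u','n','t','y'] = true := by simpa using h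
      unfold matchBoundary; rw [hlast]; simp [by_y, hC]
    · -- kb = "locality": f cannot also end with "county"
      have hlast : f.toList.getLast? = some 'y' := by
        rw [getLast?_of_suffix hsuf (by decide)]; decide
      have hco : PySem.Str.endswith f "county" = false := by
        by_contra hc
        simp only [Bool.not_eq_false, PySem.Str.endswith, PySem.Chars.endswith_iff] at hc
        have : ("county".toList) <:+ ("locality".toList) :=
          List.suffix_of_suffix_length_le hc hsuf (by decide)
        exact absurd this (by decide)
      have hC : PySem.Chars.endswith f.toList ['l','o','c','a','l','i','t','y'] = true := by simpa using h
      have hcoC : PySem.Chars.endswith f.toList ['c','o','u','n','t','y'] = false := by simpa using hco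
      unfold matchBoundary; rw [hlast]; simp [by_y, hC, hcoC]
    · have hlast : f.toList.getLast? = some 'o' := by
        rw [getLast?_of_suffix hsuf (by decide)]; decide
      unfold matchBoundary; rw [hlast]; simp [by_o]; simpa using h
    · have hlast : f.toList.getLast? = some 'e' := by
        rw [getLast?_of_suffix hsuf (by decide)]; decide
      unfold matchBoundary; rw [hlast]; simp [by_e]; simpa using h

-- the same equivalence, in the Bool/Chars form simp normalises to
lemma match_beq (kb : String) (hkb : kb ∈ KNOWN_BOUNDARIES) :
    (fun f => matchBoundary f == some kb)
      = (fun f => PySem.Chars.endswith f.toList kb.toList) := by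
  funext f
  have hiff := matchBoundary_eq_some_iff f kb hkb
  have he : PySem.Str.endswith f kb = PySem.Chars.endswith f.toList kb.toList := by simp
  rw [he] at hiff
  cases hE : PySem.Chars.endswith f.toList kb.toList
  · rw [hE] at hiff; simp [hiff]
  · rw [hE] at hiff; simp [hiff]

-- the grouping fold, characterised
lemma groups_getD (l : List String) (d : PySem.Dict String (List String)) (kb : String) :
    (l.foldl (fun d f =>
        match matchBoundary f with
        | some kb' => d.modify kb' [] (· ++ [f])
        | none => d) d).getD kb []
      = d.getD kb [] ++ l.filter (fun f => matchBoundary f == some kb) := by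
  induction l generalizing d with
  | nil => simp
  | cons f l ih =>
    simp only [List.foldl_cons, List.filter_cons]
    cases hm : matchBoundary f with
    | none => simp [ih]
    | some kb' =>
      by_cases hk : kb = kb'
      · subst hk
        simp [ih]
      · simp [ih, PySem.Dict.getD_modify, hk, Ne.symm hk]

lemma groups_contains (l : List String) (d : PySem.Dict String (List String)) (kb : String) :
    (l.foldl (fun d f =>
        match matchBoundary f with
        | some kb' => d.modify kb' [] (· ++ [f])
        | none => d) d).contains kb
      = (d.contains kb || l.any (fun f => matchBoundary f == some kb)) := by
  induction l generalizing d with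
  | nil => simp
  | cons f l ih =>
    simp only [List.foldl_cons, List.any_cons]
    cases hm : matchBoundary f with
    | none => simp [ih]
    | some kb' =>
      by_cases hk : kb = kb'
      · subst hk
        simp [ih, PySem.Dict.contains_modify]
      · have h1 : (kb == kb') = false := beq_eq_false_iff_ne.mpr hk
        have h2 : (kb' == kb) = false := beq_eq_false_iff_ne.mpr (Ne.symm hk)
        simp [ih, PySem.Dict.contains_modify, h1, h2]

-- B's assembly step equals A's per-boundary filter step, for every known boundary
lemma step_eq (features : List String) (d : PySem.Dict String (List String))
    (kb : String) (hkb : kb ∈ KNOWN_BOUNDARIES) :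
    (if (features.foldl (fun d f =>
          match matchBoundary f with
          | some kb' => d.modify kb' [] (· ++ [f])
          | none => d) PySem.Dict.empty).contains kb = true
     then d.insert kb ((features.foldl (fun d f =>
          match matchBoundary f with
          | some kb' => d.modify kb' [] (· ++ [f])
          | none => d) PySem.Dict.empty).getD kb [])
     else d)
    = (let kf := features.filter (fun f => PySem.Str.endswith f kb)
       if kf = [] then d else d.insert kb kf) := by
  rw [groups_contains, groups_getD]
  simp only [PySem.Dict.contains_empty, PySem.Dict.getD_empty, Bool.false_or, List.nil_append,
    match_beq kb hkb, PySem.Str.endswith_eq]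
  by_cases hkf : features.filter (fun f => PySem.Chars.endswith f.toList kb.toList) = []
  · have hany : features.any (fun f => PySem.Chars.endswith f.toList kb.toList) = false := by
      rw [List.any_eq_false]
      exact fun f hf => by simpa using (List.filter_eq_nil_iff.mp hkf) f hf
    simp [hany, hkf]
  · have hany : features.any (fun f => PySem.Chars.endswith f.toList kb.toList) = true := by
      rw [List.any_eq_true]
      obtain ⟨f, hf⟩ := List.exists_mem_of_ne_nil _ hkf
      have hm := List.mem_filter.mp hf
      exact ⟨f, hm.1, hm.2⟩
    simp [hany, hkf]

-- ===== VERDICT (by name: the statement is the Claim_ definition above) =====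
theorem infer_bounds_spec : Claim_equal_infer_bounds := by
  intro boundaries features _
  unfold Spec_infer_bounds infer_bounds infer_bounds_alt
  have hfold : ∀ r0 : PySem.Dict String (List String),
      KNOWN_BOUNDARIES.foldl
        (fun d kb => if (features.foldl (fun d f =>
            match matchBoundary f with
            | some kb' => d.modify kb' [] (· ++ [f])
            | none => d) PySem.Dict.empty).contains kb
          then d.insert kb ((features.foldl (fun d f =>
            match matchBoundary f with
            | some kb' => d.modify kb' [] (· ++ [f])
            | none => d) PySem.Dict.empty).getD kb []) else d) r0
      = KNOWN_BOUNDARIES.foldl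
        (fun d kb =>
          let kf := features.filter (fun f => PySem.Str.endswith f kb)
          if kf = [] then d else d.insert kb kf) r0 := by
    intro r0
    exact PySem.List.foldl_congr_mem _ _ _ _ (fun acc kb hkb => step_eq features acc kb hkb)
  by_cases hf : features = []
  · subst hf
    simp [KNOWN_BOUNDARIES, List.foldl]
  · simp only [hf, if_false, hfold]
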